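-- pv_equiv track=rewrite | github.com/o-benz/ITI1520 | Tests/T2/q4test2.py | nyasa
-- ===== SOURCE A (Python) =====
-- def nyasa(L):
--     L2=[]
--     c=0
--     a=0
--     for i in range(len(L)):
--         L2.append(len(L[i]))
--
--     for j in range(len(L2)):
--         if L2.count(L2[j])!=1:
--             c+=L2.count(L2[j])-1
--     return c//2
-- ===== SOURCE B (Python) =====
-- def nyasa(L):
--     freq = {}
--     for s in L:
--         n = len(s)
--         freq[n] = freq.get(n, 0) + 1
--     total = 0
--     for k in freq.values():
--         total += k * (k - 1) // 2
--     return total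
-- ===== Notes on version B (the rewrite author's own statement) =====
-- stated objective: faster
-- what changed: Replaced the quadratic loop that calls list.count for every element with a single-pass length-frequency dictionary and the closed form k*(k-1)//2 per frequency.
import Mathlib
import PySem

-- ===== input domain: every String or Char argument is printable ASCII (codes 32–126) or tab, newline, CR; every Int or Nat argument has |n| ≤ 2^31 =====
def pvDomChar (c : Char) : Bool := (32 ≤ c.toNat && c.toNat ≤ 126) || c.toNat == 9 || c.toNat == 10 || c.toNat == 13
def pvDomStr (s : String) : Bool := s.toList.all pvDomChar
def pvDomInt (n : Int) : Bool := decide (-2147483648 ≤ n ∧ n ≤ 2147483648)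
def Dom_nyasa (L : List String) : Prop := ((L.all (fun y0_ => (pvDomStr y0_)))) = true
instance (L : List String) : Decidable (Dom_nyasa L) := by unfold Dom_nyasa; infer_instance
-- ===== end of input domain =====

-- B replaces A's quadratic per-element list.count scan by a one-pass length-frequency
-- dictionary and the closed form k*(k-1)//2 per frequency (asymptotically faster).

-- ===== PORT A =====
def nyasa (L : List String) : Int :=
  let L2 : List Int :=
    List.foldl (fun acc i => acc ++ [PySem.Str.len (PySem.List.pyGetD L i "")]) []
      (PySem.List.pyRange 0 (PySem.List.len L))
  let c : Int :=
    List.foldl (fun c j =>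
      if PySem.List.count L2 (PySem.List.pyGetD L2 j 0) ≠ 1
      then c + ((PySem.List.count L2 (PySem.List.pyGetD L2 j 0) : Int) - 1)
      else c) 0
      (PySem.List.pyRange 0 (PySem.List.len L2))
  PySem.Int.floordiv c 2

-- ===== PORT B =====
def nyasa_alt (L : List String) : Int :=
  let freq : PySem.Dict Int Int :=
    List.foldl (fun d s =>
      let n := PySem.Str.len s
      d.insert n (d.getD n 0 + 1)) PySem.Dict.empty L
  List.foldl (fun total k => total + PySem.Int.floordiv (k * (k - 1)) 2) 0 freq.values

-- ===== PRECONDITION & SPEC =====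
def Spec_nyasa (L : List String) (out : Int) : Prop := out = nyasa_alt L
instance (L : List String) (out : Int) : Decidable (Spec_nyasa L out) := by unfold Spec_nyasa; infer_instance

-- ===== CLAIM (what is proved, stated in full; the proofs are below) =====
def Claim_equal_nyasa : Prop := ∀ (L : List String), Dom_nyasa L → Spec_nyasa L (nyasa L)

-- ===== LEMMAS AND PROOFS =====

-- c*(c-1) is even, so the closed form halves it exactly.
theorem pv_mul_pred_eq_two_floordiv (c : Int) :
    c * (c - 1) = 2 * PySem.Int.floordiv (c * (c - 1)) 2 := by
  rw [PySem.Int.floordiv_eq_ediv_of_pos (by omega)]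
  obtain ⟨k, hk⟩ : Even (c * (c - 1)) := by
    have := Int.even_mul_succ_self (c - 1)
    simpa [mul_comm, sub_add_cancel] using this
  omega

-- Grouping: a sum of f over xs equals the count-weighted sum over the distinct elements.
theorem pv_sum_group (xs : List Int) (f : Int → Int) :
    (xs.map f).sum
      = ((PySem.Set.ofList xs : List Int).map
          (fun v => (List.count v xs : Int) * f v)).sum := by
  have hm : (xs.map f).sum = ((xs : Multiset Int).map f).sum := rfl
  rw [hm, Finset.sum_multiset_map_count]
  have hfin : (xs : Multiset Int).toFinset
      = ((PySem.Set.ofList xs : List Int) : Multiset Int).toFinset := by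
    ext v
    simp [PySem.Set.mem_ofList]
  rw [hfin, ← List.sum_toFinset _ (PySem.Set.nodup_ofList xs)]
  apply Finset.sum_congr rfl
  intro v hv
  simp [Multiset.coe_count]

-- A's accumulated c is Σ over the length list of (count - 1).
theorem pv_a_value (L : List String) :
    nyasa L = PySem.Int.floordiv
      ((List.map (fun x => ((List.count x (L.map PySem.Str.len) : Int) - 1))
        (L.map PySem.Str.len)).sum) 2 := by
  unfold nyasa
  have h1 : List.foldl (fun acc i => acc ++ [PySem.Str.len (PySem.List.pyGetD L i "")]) []
        (PySem.List.pyRange 0 (PySem.List.len L)) = L.map PySem.Str.len := by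
    rw [PySem.List.foldl_append_singleton_eq_map, List.nil_append,
        show (fun i => PySem.Str.len (PySem.List.pyGetD L i "")) =
          PySem.Str.len ∘ (fun i => PySem.List.pyGetD L i "") from rfl,
        ← List.map_map, PySem.List.map_pyGetD_pyRange_zero]
  simp only [h1]
  set xs := L.map PySem.Str.len with hxs
  rw [PySem.List.foldl_pyRange_zero_pyGetD xs 0
      (fun c x => if PySem.List.count xs x ≠ 1
        then c + ((PySem.List.count xs x : Int) - 1) else c) 0]
  have h2 : (fun (c : Int) (x : Int) => if PySem.List.count xs x ≠ 1
        then c + ((PySem.List.count xs x : Int) - 1) else c)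
      = fun c x => c + ((List.count x xs : Int) - 1) := by
    funext c x
    rw [PySem.List.count_eq]
    split_ifs with h
    · rfl
    · rw [not_not.mp h]; norm_num
  rw [h2, PySem.List.foldl_add, zero_add]

-- B's value is the per-frequency closed form over the distinct lengths.
theorem pv_b_value (L : List String) :
    nyasa_alt L =
      ((PySem.Set.ofList (L.map PySem.Str.len) : List Int).map
        (fun v => PySem.Int.floordiv
          ((List.count v (L.map PySem.Str.len) : Int)
            * ((List.count v (L.map PySem.Str.len) : Int) - 1)) 2)).sum := by
  unfold nyasa_alt
  have h1 : List.foldl (fun d s =>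
        let n := PySem.Str.len s
        d.insert n (d.getD n 0 + 1)) PySem.Dict.empty L
      = PySem.Dict.counter (L.map PySem.Str.len) := by
    rw [← PySem.Dict.foldl_insert_getD_add_one_eq_counter, List.foldl_map]
  simp only [h1]
  rw [show (PySem.Dict.counter (L.map PySem.Str.len)).values
      = (PySem.Dict.counter (L.map PySem.Str.len)).items.map Prod.snd from rfl]
  rw [PySem.Dict.items_counter, List.map_map, PySem.List.foldl_add, zero_add, List.map_map]
  rfl

-- ===== VERDICT (by name: the statement is the Claim_ definition above) =====
theorem nyasa_spec : Claim_equal_nyasa := by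
  intro L _
  unfold Spec_nyasa
  rw [pv_a_value, pv_b_value, pv_sum_group]
  have h3 : ((PySem.Set.ofList (L.map PySem.Str.len) : List Int).map
        (fun v => (List.count v (L.map PySem.Str.len) : Int)
          * ((List.count v (L.map PySem.Str.len) : Int) - 1)))
      = ((PySem.Set.ofList (L.map PySem.Str.len) : List Int).map
        (fun v => 2 * PySem.Int.floordiv
          ((List.count v (L.map PySem.Str.len) : Int)
            * ((List.count v (L.map PySem.Str.len) : Int) - 1)) 2)) := by
    apply List.map_congr_left
    intro v _
    exact pv_mul_pred_eq_two_floordiv _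
  rw [h3, List.sum_map_mul_left, PySem.Int.floordiv_eq_ediv_of_pos (by omega)]
  omega
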